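-- pv_equiv track=rewrite | github.com/jackpark071801/letter_boxed | letter_boxed.py | find_words_for_all_starting_letters
-- ===== SOURCE A (Python) =====
-- from typing import List, Dict, Tuple, Optional
--
-- def is_on_side(
--     letter: str,
--     side: int,
--     ) -> bool:
--     return letter in side
--
-- def find_side(
--     letter: str,
--     letter_square: List[List[str]],
--     ) -> Optional[bool]:
--     for i, side in enumerate(letter_square):
--         if is_on_side(letter, side):
--             return i
--     return None
--
-- def is_valid_word(
--     word: str,
--     letter_square: List[List[str]],
--     ) -> bool:
--     prev_side = find_side(word[0], letter_square)
--
--     if prev_side is None: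
--         return False
--
--     for letter in word[1:]:
--         current_side = find_side(letter, letter_square)
--         if current_side is None or current_side == prev_side:
--             return False
--         prev_side = current_side
--
--     return True
--
-- def find_words_for_all_starting_letters(
--     words: List[str],
--     letter_square: List[List[str]],
--     ) -> Tuple[List[str], List[int]]:
--     all_valid_words = {}
--     used_letters_per_word = {}
--
--     for side in letter_square:
--         for start_letter in side:
--             valid_words = [word for word in words if word[0] == start_letter and is_valid_word(word, letter_square)]
--             if valid_words:
--                 all_valid_words[start_letter] = valid_words
--
--                 for word in valid_words:
--                     used_letters_per_word[word] = set(word)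
--
--     return all_valid_words, used_letters_per_word
-- ===== SOURCE B (Python) =====
-- from typing import List, Dict, Tuple, Optional
--
-- def is_on_side(letter, side):
--     return letter in side
--
-- def find_side(letter, letter_square):
--     for i, side in enumerate(letter_square):
--         if is_on_side(letter, side):
--             return i
--     return None
--
-- def is_valid_word(word, letter_square):
--     prev_side = find_side(word[0], letter_square)
--     if prev_side is None:
--         return False
--     for letter in word[1:]:
--         current_side = find_side(letter, letter_square)
--         if current_side is None or current_side == prev_side:
--             return False
--         prev_side = current_side
--     return True
--
-- def find_words_for_all_starting_letters(words, letter_square):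
--     # one pass over `words`: bucket valid words by first letter
--     buckets = {}
--     for word in words:
--         if is_valid_word(word, letter_square):
--             buckets.setdefault(word[0], []).append(word)
--     # board letters whose bucket is non-empty, in board order
--     letters = [l for side in letter_square for l in side if buckets.get(l)]
--     all_valid_words = {l: buckets[l] for l in letters}
--     used_letters_per_word = {w: set(w) for l in letters for w in buckets[l]}
--     return all_valid_words, used_letters_per_word
-- ===== Notes on version B (the rewrite author's own statement) =====
-- stated objective: faster
-- what changed: Instead of rescanning the whole word list once per board letter (nested loops with a full filter of `words` inside and an accumulated pair of dicts), B makes a single bucketing pass over `words` grouping valid words by first letter, then computes the flat list of board letters with non-empty buckets and builds each result dict by its own comprehension over that list.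
-- outside the precondition, e.g. on find_words_for_all_starting_letters([''], []): A returns ({}, {}), B raises IndexError
import Mathlib
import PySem

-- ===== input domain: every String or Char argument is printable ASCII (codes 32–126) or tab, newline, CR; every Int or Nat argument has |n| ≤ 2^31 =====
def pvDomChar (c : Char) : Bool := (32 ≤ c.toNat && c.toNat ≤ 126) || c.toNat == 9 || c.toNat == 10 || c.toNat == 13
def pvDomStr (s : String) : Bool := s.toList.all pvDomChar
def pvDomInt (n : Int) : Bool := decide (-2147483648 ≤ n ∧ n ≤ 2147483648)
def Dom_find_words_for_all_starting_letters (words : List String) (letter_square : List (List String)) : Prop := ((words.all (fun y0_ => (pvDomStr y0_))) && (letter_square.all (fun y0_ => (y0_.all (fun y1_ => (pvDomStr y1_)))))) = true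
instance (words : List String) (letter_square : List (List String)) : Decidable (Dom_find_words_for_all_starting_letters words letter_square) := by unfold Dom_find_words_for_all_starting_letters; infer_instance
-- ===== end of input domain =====

-- B replaces A's per-board-letter rescans of `words` by one bucketing pass over `words`
-- followed by comprehensions over the board letters with non-empty buckets (objective: faster).

-- ===== PORT A =====
-- `letter in side`
def is_on_side (letter : String) (side : List String) : Bool := side.contains letter

-- `for i, side in enumerate(letter_square): …` (hand-rolled index recursion; exact)
def find_side_aux (letter : String) (i : Int) : List (List String) → Option Int
  | [] => none
  | side :: rest => if is_on_side letter side then some i else find_side_aux letter (i + 1) rest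

def find_side (letter : String) (letter_square : List (List String)) : Option Int :=
  find_side_aux letter 0 letter_square

-- a 1-character Python string, as produced by `word[0]` / iterating a str
def pyChar (c : Char) : String := String.ofList [c]

-- `for letter in word[1:]` loop body of is_valid_word
def valid_loop (letter_square : List (List String)) (prev_side : Int) : List Char → Bool
  | [] => true
  | c :: rest =>
    match find_side (pyChar c) letter_square with
    | none => false
    | some current_side =>
      if current_side = prev_side then false else valid_loop letter_square current_side rest

-- is_valid_word; `word[0]` raises IndexError on the empty word (excluded by Pre_), the [] branch is unreachable there
def is_valid_word (word : String) (letter_square : List (List String)) : Bool :=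
  match word.toList with
  | [] => false
  | c :: rest =>
    match find_side (pyChar c) letter_square with
    | none => false
    | some prev_side => valid_loop letter_square prev_side rest

-- `word[0]` as an Option (none = would raise; Pre_ excludes that)
def firstLetter? (word : String) : Option String := word.toList.head?.map pyChar

-- `set(word)` (a Python str iterates as 1-char strings)
def word_letters (word : String) : List String := PySem.Set.ofList (word.toList.map pyChar)

def find_words_for_all_starting_letters (words : List String) (letter_square : List (List String)) : (List (String × List String)) × (List (String × List String)) :=
  let st := letter_square.foldl
    (fun (st : PySem.Dict String (List String) × PySem.Dict String (List String)) side =>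
      side.foldl
        (fun st start_letter =>
          let valid_words := words.filter (fun word => (firstLetter? word == some start_letter) && is_valid_word word letter_square)
          if valid_words = [] then st
          else (st.1.insert start_letter valid_words,
                valid_words.foldl (fun d word => d.insert word (word_letters word)) st.2))
        st)
    (PySem.Dict.empty, PySem.Dict.empty)
  (st.1.items, st.2.items)

-- ===== PORT B =====
-- the single bucketing pass: buckets.setdefault(word[0], []).append(word)
def bucket_pass (letter_square : List (List String)) : List String → PySem.Dict String (List String) → PySem.Dict String (List String)
  | [], d => d
  | word :: rest, d =>
    bucket_pass letter_square rest
      (if is_valid_word word letter_square then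
        match firstLetter? word with
        | some l => d.modify l [] (· ++ [word])
        | none => d   -- unreachable: is_valid_word is false on the empty word
       else d)

def find_words_for_all_starting_letters_alt (words : List String) (letter_square : List (List String)) : (List (String × List String)) × (List (String × List String)) :=
  let buckets := bucket_pass letter_square words PySem.Dict.empty
  -- letters = [l for side in letter_square for l in side if buckets.get(l)]
  let letters := (letter_square.flatMap (fun side => side)).filter (fun l => buckets.getD l [] ≠ [])
  -- all_valid_words = {l: buckets[l] for l in letters}
  let all_valid := letters.foldl (fun d l => d.insert l (buckets.getD l [])) PySem.Dict.empty
  -- used_letters_per_word = {w: set(w) for l in letters for w in buckets[l]}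
  let used := letters.foldl
    (fun d l => (buckets.getD l []).foldl (fun d w => d.insert w (word_letters w)) d) PySem.Dict.empty
  (all_valid.items, used.items)

-- ===== PRECONDITION & SPEC =====
-- Pre_ excludes word lists containing the empty string: there `word[0]` raises IndexError — in A
-- whenever the square has at least one letter, and in B's single validity pass always (so when the
-- square has no letters A still returns ({}, {}) but B raises; that input is excluded and cited).
def Pre_find_words_for_all_starting_letters (words : List String) (letter_square : List (List String)) : Prop := "" ∉ words
instance (words : List String) (letter_square : List (List String)) : Decidable (Pre_find_words_for_all_starting_letters words letter_square) := by unfold Pre_find_words_for_all_starting_letters; infer_instance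

def pvWitness_find_words_for_all_starting_letters : List String × List (List String) := (["ab", "ba", "aa"], [["a"], ["b"]])

def Spec_find_words_for_all_starting_letters (words : List String) (letter_square : List (List String)) (out : (List (String × List String)) × (List (String × List String))) : Prop := out = find_words_for_all_starting_letters_alt words letter_square
instance (words : List String) (letter_square : List (List String)) (out : (List (String × List String)) × (List (String × List String))) : Decidable (Spec_find_words_for_all_starting_letters words letter_square out) := by unfold Spec_find_words_for_all_starting_letters; infer_instance

-- ===== CLAIM (what is proved, stated in full; the proofs are below) =====
def Claim_equal_find_words_for_all_starting_letters : Prop := ∀ (words : List String) (letter_square : List (List String)), Dom_find_words_for_all_starting_letters words letter_square → Pre_find_words_for_all_starting_letters words letter_square → Spec_find_words_for_all_starting_letters words letter_square (find_words_for_all_starting_letters words letter_square)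

-- ===== LEMMAS AND PROOFS =====

-- B's bucket, read at any letter l, is A's filtered list (appended to what was there already)
theorem getD_bucket_pass (letter_square : List (List String)) (words : List String)
    (d : PySem.Dict String (List String)) (l : String) :
    (bucket_pass letter_square words d).getD l []
    = d.getD l [] ++ words.filter (fun word => (firstLetter? word == some l) && is_valid_word word letter_square) := by
  induction words generalizing d with
  | nil => simp [bucket_pass]
  | cons w ws ih =>
    simp only [bucket_pass, List.filter_cons]
    by_cases hv : is_valid_word w letter_square
    · simp only [hv, if_true, Bool.and_true]
      cases hf : firstLetter? w with
      | none => rw [ih]; simp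
      | some k =>
        rw [ih]
        by_cases hk : k = l
        · subst hk
          simp [PySem.Dict.getD_modify_self]
        · rw [PySem.Dict.getD_modify]
          have hlk : ¬ l = k := fun h => hk h.symm
          simp [hlk, hk]
    · simp only [hv, Bool.and_false]
      rw [ih]
      simp

-- a fold whose step acts componentwise on a pair splits into two independent folds
theorem foldl_prod_split {α β γ : Type} (f : α → γ → α) (g : β → γ → β)
    (l : List γ) (a : α) (b : β) :
    l.foldl (fun (p : α × β) x => (f p.1 x, g p.2 x)) (a, b)
    = (l.foldl f a, l.foldl g b) := by
  induction l generalizing a b with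
  | nil => rfl
  | cons x xs ih => simp [List.foldl_cons, ih]

theorem find_words_for_all_starting_letters_spec : Claim_equal_find_words_for_all_starting_letters := by
  intro words letter_square _ _
  unfold Spec_find_words_for_all_starting_letters
  unfold find_words_for_all_starting_letters find_words_for_all_starting_letters_alt
  -- name B's bucket dictionary
  set buckets := bucket_pass letter_square words PySem.Dict.empty with hbuckets
  -- A's inner filter of `words` is exactly a read of B's bucket
  have hfilter : ∀ l : String,
      words.filter (fun word => (firstLetter? word == some l) && is_valid_word word letter_square)
      = buckets.getD l [] := by
    intro l
    rw [hbuckets, getD_bucket_pass]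
    simp [PySem.Dict.getD_empty]
  -- rewrite A's nested fold: flatten the two loops, substitute the bucket read,
  -- turn the skip-empty `if` into a filter, and split the pair fold
  have hstep :
      (fun (st : PySem.Dict String (List String) × PySem.Dict String (List String)) start_letter =>
        let valid_words := words.filter (fun word => (firstLetter? word == some start_letter) && is_valid_word word letter_square)
        if valid_words = [] then st
        else (st.1.insert start_letter valid_words,
              valid_words.foldl (fun d word => d.insert word (word_letters word)) st.2))
      = (fun (st : PySem.Dict String (List String) × PySem.Dict String (List String)) l =>
          if (fun l => decide (buckets.getD l [] ≠ [])) l = true then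
            (fun (st : PySem.Dict String (List String) × PySem.Dict String (List String)) l =>
              ((fun (d : PySem.Dict String (List String)) l => d.insert l (buckets.getD l [])) st.1 l,
               (fun (d : PySem.Dict String (List String)) l => (buckets.getD l []).foldl (fun d word => d.insert word (word_letters word)) d) st.2 l)) st l
          else st) := by
    funext st l
    rw [hfilter l]
    by_cases h : buckets.getD l [] = [] <;> simp [h]
  rw [← List.foldl_flatten, hstep, ← List.foldl_filter]
  have hfm : letter_square.flatMap (fun side => side) = letter_square.flatten := by simp
  rw [hfm]
  rw [foldl_prod_split
    (fun (d : PySem.Dict String (List String)) l => d.insert l (buckets.getD l []))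
    (fun (d : PySem.Dict String (List String)) l => (buckets.getD l []).foldl (fun d word => d.insert word (word_letters word)) d)
    (letter_square.flatten.filter (fun l => decide (buckets.getD l [] ≠ [])))
    PySem.Dict.empty PySem.Dict.empty]
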